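-- pv_equiv track=rewrite | github.com/QAGIw3/PlatformQ | services/seatunnel-service/app/main.py | _extract_error_from_logs
-- ===== SOURCE A (Python) =====
-- def _extract_error_from_logs(logs: str) -> str:
--     """Extract error message from SeaTunnel logs"""
--     error_lines = []
--     in_error = False
--
--     for line in logs.split("\n"):
--         if "ERROR" in line or "Exception" in line:
--             in_error = True
--         if in_error:
--             error_lines.append(line)
--             if len(error_lines) > 10:  # Limit error message length
--                 break
--
--     return "\n".join(error_lines) or "Job failed without clear error message"
-- ===== SOURCE B (Python) =====
-- def _extract_error_from_logs(logs: str) -> str: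
--     """Extract error message from SeaTunnel logs"""
--     lines = logs.split("\n")
--     i = next((i for i, l in enumerate(lines) if "ERROR" in l or "Exception" in l), None)
--     if i is None:
--         return "Job failed without clear error message"
--     return "\n".join(lines[i:i + 11])
-- ===== Notes on version B (the rewrite author's own statement) =====
-- stated objective: simpler
-- what changed: B locates the index of the first line containing an error marker and returns a fixed 11-line slice joined from there, instead of A's stateful flag-and-accumulator loop with a break.
import Mathlib
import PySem

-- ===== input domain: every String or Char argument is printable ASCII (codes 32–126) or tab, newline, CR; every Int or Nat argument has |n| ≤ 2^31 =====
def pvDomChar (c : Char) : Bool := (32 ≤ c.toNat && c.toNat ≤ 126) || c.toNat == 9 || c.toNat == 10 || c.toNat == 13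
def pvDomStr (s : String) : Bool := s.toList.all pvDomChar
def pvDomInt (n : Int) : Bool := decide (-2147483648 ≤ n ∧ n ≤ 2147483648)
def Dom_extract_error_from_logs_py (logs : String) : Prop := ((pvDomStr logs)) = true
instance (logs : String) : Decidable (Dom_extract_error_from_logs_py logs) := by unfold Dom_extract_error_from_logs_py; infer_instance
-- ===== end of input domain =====

-- B replaces A's stateful flag-and-accumulator loop by "find the index of the first error line,
-- then take a fixed 11-line slice" (objective: simpler).

-- ===== PORT A =====
-- the error-marker test of the Python source
def pvIsErrLine (l : String) : Bool :=
  PySem.Str.isIn "ERROR" l || PySem.Str.isIn "Exception" l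

-- A's for-loop over the lines: state = (error_lines, in_error); the `break` is the early return.
def pvALoop : List String → List String → Bool → List String
  | [], acc, _ => acc
  | l :: rest, acc, in_error =>
    let in_error := if pvIsErrLine l then true else in_error
    if in_error then
      let acc' := acc ++ [l]
      if acc'.length > 10 then acc' else pvALoop rest acc' in_error
    else pvALoop rest acc in_error

def extract_error_from_logs_py (logs : String) : String :=
  let lines := (PySem.Chars.splitOn logs.toList ['\n']).map String.ofList
  let error_lines := pvALoop lines [] false
  let joined := PySem.Str.join "\n" error_lines
  -- Python's `s or default`: the joined string is falsy iff it is empty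
  if PySem.Str.len joined = 0 then "Job failed without clear error message" else joined

-- ===== PORT B =====
def extract_error_from_logs_py_alt (logs : String) : String :=
  let lines := (PySem.Chars.splitOn logs.toList ['\n']).map String.ofList
  match List.findIdx? (fun l => PySem.Str.isIn "ERROR" l || PySem.Str.isIn "Exception" l) lines with
  | none => "Job failed without clear error message"
  | some i => PySem.Str.join "\n" (PySem.List.slice lines (some (i : Int)) (some ((i : Int) + 11)))

-- ===== PRECONDITION & SPEC =====
def Spec_extract_error_from_logs_py (logs : String) (out : String) : Prop := out = extract_error_from_logs_py_alt logs
instance (logs : String) (out : String) : Decidable (Spec_extract_error_from_logs_py logs out) := by unfold Spec_extract_error_from_logs_py; infer_instance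

-- ===== CLAIM (what is proved, stated in full; the proofs are below) =====
def Claim_equal_extract_error_from_logs_py : Prop := ∀ (logs : String), Dom_extract_error_from_logs_py logs → Spec_extract_error_from_logs_py logs (extract_error_from_logs_py logs)

-- ===== LEMMAS AND PROOFS =====

-- Phase 2 of A's loop: once the flag is set, it appends lines until 11 are collected.
lemma pvALoop_true (rest : List String) : ∀ acc : List String, acc.length ≤ 10 →
    pvALoop rest acc true = acc ++ rest.take (11 - acc.length) := by
  induction rest with
  | nil => intro acc h; simp [pvALoop]
  | cons l rest ih =>
    intro acc h
    simp only [pvALoop, ite_self]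
    by_cases hlen : (acc ++ [l]).length > 10
    · simp only [if_pos hlen]
      have : acc.length = 10 := by simp at hlen ⊢; omega
      have h1 : 11 - acc.length = 1 := by omega
      simp [h1]
    · simp only [if_neg hlen]
      rw [ih (acc ++ [l]) (by simp at hlen ⊢; omega)]
      have h1 : 11 - acc.length = (11 - (acc ++ [l]).length) + 1 := by
        simp at hlen ⊢; omega
      simp [h1, List.take_succ_cons]

-- Phase 1: A's loop equals "take 11 lines from the first error line".
lemma pvALoop_spec (lines : List String) :
    pvALoop lines [] false =
      match List.findIdx? pvIsErrLine lines with
      | none => []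
      | some i => (lines.drop i).take 11 := by
  induction lines with
  | nil => simp [pvALoop]
  | cons l rest ih =>
    simp only [pvALoop, List.findIdx?_cons]
    by_cases hp : pvIsErrLine l
    · simp only [if_pos hp]
      have := pvALoop_true rest [l] (by simp)
      simp at this
      simp [this, List.take_succ_cons]
    · simp only [if_neg hp, if_neg (by simp : ¬ (false = true))]
      rw [ih]
      cases List.findIdx? pvIsErrLine rest <;> simp

-- If findIdx? finds an index, the list dropped there starts with a line satisfying the predicate.
lemma pvFindIdx?_drop {α : Type} (p : α → Bool) : ∀ (xs : List α) (i : Nat),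
    List.findIdx? p xs = some i → ∃ x t, xs.drop i = x :: t ∧ p x = true := by
  intro xs
  induction xs with
  | nil => intro i h; simp at h
  | cons x xs ih =>
    intro i h
    rw [List.findIdx?_cons] at h
    by_cases hp : p x
    · simp only [if_pos hp, Option.some.injEq] at h; subst h; exact ⟨x, xs, rfl, hp⟩
    · simp [hp] at h
      obtain ⟨j, hj, rfl⟩ := h
      obtain ⟨y, t, hyt, hy⟩ := ih j hj
      exact ⟨y, t, by simpa using hyt, hy⟩

-- A line containing "ERROR" or "Exception" is nonempty.
lemma pvErrLine_ne_nil (l : String) (h : pvIsErrLine l = true) : l.toList ≠ [] := by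
  unfold pvIsErrLine at h
  rcases Bool.or_eq_true_iff.mp h with h' | h' <;>
  · have hinf := (PySem.Str.isIn_iff_infix _ _).mp h'
    intro hnil
    rw [hnil] at hinf
    simp [List.infix_nil] at hinf

-- Joining a list whose head is a nonempty string gives a nonempty string.
lemma pvJoin_ne_empty (x : String) (t : List String) (hx : x.toList ≠ []) :
    PySem.Str.len (PySem.Str.join "\n" (x :: t)) ≠ 0 := by
  rw [PySem.Str.len_eq, PySem.Str.toList_join]
  simp only [ne_eq, Nat.cast_eq_zero]
  cases t with
  | nil =>
    simp only [List.map_cons, List.map_nil, PySem.Chars.join_singleton]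
    simpa [List.length_eq_zero_iff] using hx
  | cons y t =>
    rw [List.map_cons, List.map_cons, PySem.Chars.join_cons_cons]
    simp only [List.length_append]
    have : x.toList.length ≠ 0 := by simpa [List.length_eq_zero_iff] using hx
    omega

-- ===== VERDICT (by name: the statement is the Claim_ definition above) =====
theorem extract_error_from_logs_py_spec : Claim_equal_extract_error_from_logs_py := by
  intro logs _
  unfold Spec_extract_error_from_logs_py extract_error_from_logs_py extract_error_from_logs_py_alt
  simp only []
  set lines := (PySem.Chars.splitOn logs.toList ['\n']).map String.ofList with hlines
  rw [pvALoop_spec]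
  have hpred : (fun l => PySem.Str.isIn "ERROR" l || PySem.Str.isIn "Exception" l) = pvIsErrLine := rfl
  rw [hpred]
  cases hfi : List.findIdx? pvIsErrLine lines with
  | none =>
    simp only []
    have : PySem.Str.len (PySem.Str.join "\n" ([] : List String)) = 0 := by decide
    rw [if_pos this]
  | some i =>
    simp only []
    have hsl : PySem.List.slice lines (some (i : Int)) (some ((i : Int) + 11)) = (lines.drop i).take 11 := by
      have h := PySem.List.slice_natCast lines i (i + 11)
      have harith : i + 11 - i = 11 := by omega
      rw [harith] at h
      push_cast at h
      exact h
    rw [hsl]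
    obtain ⟨x, t, hxt, hx⟩ := pvFindIdx?_drop pvIsErrLine lines i hfi
    rw [hxt]
    rw [List.take_succ_cons]
    exact if_neg (pvJoin_ne_empty x _ (pvErrLine_ne_nil x hx))
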